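-- pv_equiv track=rewrite | github.com/drishanroy/resume-analysis-app | backend/utils.py | detect_sections
-- ===== SOURCE A (Python) =====
-- from typing import List, Dict, Any
--
-- HEADER_HINTS = ["experience","work","projects","education","skills","summary","certifications"]
--
-- def detect_sections(text: str) -> Dict[str, str]:
--     """Very simple header-based segmentation that is resilient to common headings."""
--     lines = [l.strip() for l in text.splitlines()]
--     sections: Dict[str, List[str]] = {k: [] for k in HEADER_HINTS}
--     current = "summary"
--     for ln in lines:
--         key = ln.lower()
--         matched = None
--         for h in HEADER_HINTS:
--             if h in key and len(ln) <= 40: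
--                 matched = h
--                 break
--         if matched:
--             current = matched
--             continue
--         sections[current].append(ln)
--     return {k: "\n".join(v).strip() for k, v in sections.items() if v}
-- ===== SOURCE B (Python) =====
-- HEADER_HINTS = ["experience","work","projects","education","skills","summary","certifications"]
--
-- def _header_match(ln):
--     if len(ln) > 40:
--         return None
--     low = ln.lower()
--     for h in HEADER_HINTS:
--         if h in low:
--             return h
--     return None
--
-- def detect_sections(text):
--     """Two-pass: collect header boundaries, then assign index ranges between them."""
--     lines = [l.strip() for l in text.splitlines()]
--     heads = [(i, k) for i, ln in enumerate(lines) if (k := _header_match(ln)) is not None]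
--     segs = []
--     prev_i, prev_k = -1, "summary"
--     for i, k in heads:
--         segs.append((prev_k, lines[prev_i + 1:i]))
--         prev_i, prev_k = i, k
--     segs.append((prev_k, lines[prev_i + 1:]))
--     out = {}
--     for k in HEADER_HINTS:
--         v = [ln for key, b in segs if key == k for ln in b]
--         if v:
--             out[k] = "\n".join(v).strip()
--     return out
-- ===== Notes on version B (the rewrite author's own statement) =====
-- stated objective: alternative
-- what changed: Replaces A's stateful single pass (a 'current' cursor appending into pre-seeded per-key dict lists) by a two-pass decomposition: first collect header boundaries over enumerated lines, then slice the line ranges between consecutive boundaries into (key, block) segments, and finally aggregate per HEADER_HINTS key from the segment list.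
import Mathlib
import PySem

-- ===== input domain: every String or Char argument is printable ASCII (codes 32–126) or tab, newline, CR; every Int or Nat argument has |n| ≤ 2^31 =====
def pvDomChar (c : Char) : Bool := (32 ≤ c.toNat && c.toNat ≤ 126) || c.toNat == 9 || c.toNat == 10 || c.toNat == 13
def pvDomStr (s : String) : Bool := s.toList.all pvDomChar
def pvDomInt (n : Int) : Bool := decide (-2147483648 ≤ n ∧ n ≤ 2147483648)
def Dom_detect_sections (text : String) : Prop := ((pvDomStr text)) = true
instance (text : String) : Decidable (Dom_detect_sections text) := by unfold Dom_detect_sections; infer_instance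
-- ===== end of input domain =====

-- B restructures A's stateful single pass into a two-pass boundary/segment decomposition; same cost, no speed claim.

-- ===== PORT A =====
def pvHints : List String := ["experience","work","projects","education","skills","summary","certifications"]

def pvStepA (st : String × PySem.Dict String (List String)) (ln : String) :
    String × PySem.Dict String (List String) :=
  let key := PySem.Str.lower ln
  let matched := pvHints.find? (fun h => PySem.Str.isIn h key && decide (PySem.Str.len ln ≤ 40))
  match matched with
  | some h => (h, st.2)
  | none   => (st.1, st.2.modify st.1 [] (fun v => v ++ [ln]))

def detect_sections (text : String) : List (String × String) :=
  let lines := (PySem.Str.splitlines text).map PySem.Str.strip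
  let init : PySem.Dict String (List String) :=
    pvHints.foldl (fun d k => d.insert k []) PySem.Dict.empty
  let fin := lines.foldl pvStepA ("summary", init)
  fin.2.items.filterMap (fun kv =>
    if kv.2 ≠ [] then some (kv.1, PySem.Str.strip (PySem.Str.join "\n" kv.2)) else none)

-- ===== PORT B =====
def pvHit (ln : String) : Option String :=
  if PySem.Str.len ln > 40 then none
  else pvHints.find? (fun h => PySem.Str.isIn h (PySem.Str.lower ln))

def pvStepB (lines : List String) (st : List (String × List String) × Int × String)
    (ik : Int × String) : List (String × List String) × Int × String :=
  (st.1 ++ [(st.2.2, PySem.List.slice lines (some (st.2.1 + 1)) (some ik.1))], ik.1, ik.2)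

def pvFinish (lines : List String) (st : List (String × List String) × Int × String) :
    List (String × List String) :=
  st.1 ++ [(st.2.2, PySem.List.slice lines (some (st.2.1 + 1)) none)]

-- v = [ln for key, b in segs if key == k for ln in b]
def pvAgg (segs : List (String × List String)) (k : String) : List String :=
  (segs.filter (fun s => s.1 = k)).flatMap (fun s => s.2)

def detect_sections_alt (text : String) : List (String × String) :=
  let lines := (PySem.Str.splitlines text).map PySem.Str.strip
  let heads : List (Int × String) :=
    (PySem.List.enumerate lines).filterMap (fun p => (pvHit p.2).map (fun k => (p.1, k)))
  let segs := pvFinish lines (heads.foldl (pvStepB lines) ([], -1, "summary"))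
  (pvHints.foldl (fun out k =>
      if pvAgg segs k ≠ [] then
        out.insert k (PySem.Str.strip (PySem.Str.join "\n" (pvAgg segs k)))
      else out)
    PySem.Dict.empty).items

-- ===== PRECONDITION & SPEC =====
def Spec_detect_sections (text : String) (out : List (String × String)) : Prop := out = detect_sections_alt text
instance (text : String) (out : List (String × String)) : Decidable (Spec_detect_sections text out) := by unfold Spec_detect_sections; infer_instance

-- ===== CLAIM (what is proved, stated in full; the proofs are below) =====
def Claim_equal_detect_sections : Prop := ∀ (text : String), Dom_detect_sections text → Spec_detect_sections text (detect_sections text)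

-- ===== LEMMAS AND PROOFS =====

-- the common specification: blocks of lines between headers, labelled by the governing key
def pvChunks (cur : String) (pending : List String) : List String → List (String × List String)
  | [] => [(cur, pending)]
  | ln :: rest =>
    match pvHit ln with
    | some k => (cur, pending) :: pvChunks k [] rest
    | none   => pvChunks cur (pending ++ [ln]) rest

def pvMkD (g : String → List String) : PySem.Dict String (List String) :=
  PySem.Dict.mk (pvHints.map (fun k => (k, g k)))

theorem pvChunks_nil (cur : String) (pending : List String) :
    pvChunks cur pending [] = [(cur, pending)] := rfl

theorem pvChunks_cons (cur : String) (pending : List String) (ln : String) (rest : List String) :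
    pvChunks cur pending (ln :: rest) =
      match pvHit ln with
      | some k => (cur, pending) :: pvChunks k [] rest
      | none   => pvChunks cur (pending ++ [ln]) rest := rfl

-- A's inline first-match loop equals B's helper
theorem pvHit_eq (ln : String) :
    pvHints.find? (fun h => PySem.Str.isIn h (PySem.Str.lower ln) && decide (PySem.Str.len ln ≤ 40))
      = pvHit ln := by
  unfold pvHit
  by_cases hc : PySem.Str.len ln > 40
  · rw [if_pos hc]
    rw [List.find?_eq_none.mpr]
    intro x _
    have h40 : ¬ PySem.Str.len ln ≤ 40 := by omega
    simp only [Bool.and_eq_true, decide_eq_true_eq, not_and]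
    exact fun _ => h40
  · rw [if_neg hc]
    have hd : decide (PySem.Str.len ln ≤ 40) = true := by
      simp only [decide_eq_true_eq]; omega
    simp only [hd, Bool.and_true]

-- one step of A's loop, phrased through pvHit
theorem pvStepA_eq (cur : String) (d : PySem.Dict String (List String)) (ln : String) :
    pvStepA (cur, d) ln =
      match pvHit ln with
      | some h => (h, d)
      | none   => (cur, d.modify cur [] (fun v => v ++ [ln])) := by
  unfold pvStepA
  simp only [pvHit_eq]

theorem pvHit_mem {ln k : String} (h : pvHit ln = some k) : k ∈ pvHints := by
  unfold pvHit at h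
  split at h
  · simp at h
  · exact List.mem_of_find?_eq_some h

theorem pvMkD_congr {g₁ g₂ : String → List String} (h : ∀ k ∈ pvHints, g₁ k = g₂ k) :
    pvMkD g₁ = pvMkD g₂ := by
  unfold pvMkD
  congr 1
  exact List.map_congr_left (fun k hk => by rw [h k hk])

theorem pvMkD_getD (g : String → List String) (k : String) (hk : k ∈ pvHints) :
    (pvMkD g).getD k [] = g k := by
  fin_cases hk <;> rfl

theorem pvMkD_contains (g : String → List String) (k : String) (hk : k ∈ pvHints) :
    (pvMkD g).contains k = true := by
  fin_cases hk <;> rfl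

theorem pvModify_mkD (g : String → List String) (c : String) (hc : c ∈ pvHints)
    (f : List String → List String) :
    (pvMkD g).modify c [] f = pvMkD (fun k => if k = c then f (g k) else g k) := by
  unfold PySem.Dict.modify
  rw [pvMkD_getD g c hc]
  unfold PySem.Dict.insert
  rw [pvMkD_contains g c hc]
  simp only [if_true]
  unfold pvMkD
  congr 1
  rw [List.map_map]
  refine List.map_congr_left (fun k hk => ?_)
  by_cases h : k = c <;> simp [h]

-- A's loop computes the per-key aggregation of the chunks
theorem pvLoopA (rest : List String) :
    ∀ (cur : String) (pending : List String) (g : String → List String), cur ∈ pvHints →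
    (rest.foldl pvStepA (cur, pvMkD (fun k => if k = cur then g k ++ pending else g k))).2
      = pvMkD (fun k => g k ++ pvAgg (pvChunks cur pending rest) k) := by
  induction rest with
  | nil =>
    intro cur pending g hcur
    simp only [List.foldl_nil]
    refine pvMkD_congr (fun k _ => ?_)
    rw [pvChunks_nil]
    unfold pvAgg
    by_cases h : k = cur
    · subst h
      simp
    · have h' : ¬(cur = k) := fun e => h e.symm
      simp [h, h']
  | cons ln rest ih =>
    intro cur pending g hcur
    simp only [List.foldl_cons, pvStepA_eq]
    cases hh : pvHit ln with
    | some k0 =>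
      have h0 := ih k0 [] (fun k => if k = cur then g k ++ pending else g k) (pvHit_mem hh)
      rw [pvMkD_congr (g₂ := fun k => if k = cur then g k ++ pending else g k)
        (fun k _ => by by_cases h : k = k0 <;> simp [h])] at h0
      rw [h0]
      simp only [pvChunks_cons, hh]
      refine pvMkD_congr (fun k _ => ?_)
      unfold pvAgg
      rw [List.filter_cons]
      by_cases h : k = cur
      · subst h
        simp [List.append_assoc]
      · have h' : ¬(cur = k) := fun e => h e.symm
        simp [h, h']
    | none =>
      rw [pvModify_mkD _ cur hcur]
      have h1 : (fun k => if k = cur then (if k = cur then g k ++ pending else g k) ++ [ln]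
            else if k = cur then g k ++ pending else g k)
          = (fun k => if k = cur then g k ++ (pending ++ [ln]) else g k) := by
        funext k; by_cases h : k = cur <;> simp [h]
      rw [h1, ih cur (pending ++ [ln]) g hcur]
      simp only [pvChunks_cons, hh]

-- B's boundary list, recursively
def pvHeadsAux (i : Nat) : List String → List (Int × String)
  | [] => []
  | ln :: rest =>
    match pvHit ln with
    | some k => ((i : Int), k) :: pvHeadsAux (i + 1) rest
    | none   => pvHeadsAux (i + 1) rest

theorem pvHeads_eq (ls : List String) : ∀ i : Nat,
    (PySem.List.enumerate ls (i : Int)).filterMap (fun p => (pvHit p.2).map (fun k => (p.1, k)))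
      = pvHeadsAux i ls := by
  induction ls with
  | nil => intro i; rfl
  | cons ln rest ih =>
    intro i
    rw [show PySem.List.enumerate (ln :: rest) (i : Int)
        = ((i : Int), ln) :: PySem.List.enumerate rest ((i : Int) + 1) from rfl]
    rw [List.filterMap_cons,
      show ((i : Int) + 1) = ((i + 1 : Nat) : Int) from by push_cast; ring]
    unfold pvHeadsAux
    cases hh : pvHit ln with
    | some k => simp only [Option.map_some]; rw [ih (i + 1)]
    | none => simp only [Option.map_none]; exact ih (i + 1)

theorem pvHeadsAux_nil (i : Nat) : pvHeadsAux i [] = [] := rfl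

theorem pvHeadsAux_cons (i : Nat) (ln : String) (rest : List String) :
    pvHeadsAux i (ln :: rest) =
      match pvHit ln with
      | some k => ((i : Int), k) :: pvHeadsAux (i + 1) rest
      | none   => pvHeadsAux (i + 1) rest := rfl

-- B's segment fold computes the chunks
theorem pvLoopB (rest : List String) :
    ∀ (pre₀ pending : List String) (cur : String) (acc : List (String × List String))
      (lines : List String), lines = pre₀ ++ pending ++ rest →
    pvFinish lines ((pvHeadsAux (pre₀.length + pending.length) rest).foldl (pvStepB lines)
        (acc, ((pre₀.length : Int) - 1), cur))
      = acc ++ pvChunks cur pending rest := by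
  induction rest with
  | nil =>
    intro pre₀ pending cur acc lines hl
    rw [pvHeadsAux_nil, List.foldl_nil]
    unfold pvFinish
    rw [pvChunks_nil]
    rw [show ((pre₀.length : Int) - 1 + 1) = ((pre₀.length : Nat) : Int) from by ring]
    rw [PySem.List.slice_some_none, PySem.List.clampIdx_natCast, hl,
      show pre₀ ++ pending ++ ([] : List String) = pre₀ ++ pending from by simp]
    simp
  | cons ln rest ih =>
    intro pre₀ pending cur acc lines hl
    simp only [pvHeadsAux_cons]
    cases hh : pvHit ln with
    | some k0 =>
      simp only [List.foldl_cons]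
      have hstep : pvStepB lines (acc, ((pre₀.length : Int) - 1), cur)
          (((pre₀.length + pending.length : Nat) : Int), k0)
          = (acc ++ [(cur, pending)], (((pre₀ ++ pending ++ [ln]).length : Int) - 1), k0) := by
        unfold pvStepB
        have hslice : PySem.List.slice lines (some ((pre₀.length : Int) - 1 + 1))
            (some ((pre₀.length + pending.length : Nat) : Int)) = pending := by
          rw [show ((pre₀.length : Int) - 1 + 1) = ((pre₀.length : Nat) : Int) from by ring, hl]
          rw [PySem.List.slice_of_nonneg _ (by positivity) (by positivity)
            (by simp; omega) (by simp; omega)]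
          simp only [Int.toNat_natCast]
          rw [List.append_assoc, List.drop_left]
          rw [show (pre₀.length + pending.length) - pre₀.length = pending.length from by omega]
          rw [List.take_left]
        rw [hslice]
        have hidx : ((pre₀.length + pending.length : Nat) : Int)
            = ((pre₀ ++ pending ++ [ln]).length : Int) - 1 := by
          simp only [List.length_append, List.length_cons, List.length_nil]
          push_cast
          ring
        rw [hidx]
      rw [hstep]
      have h2 := ih (pre₀ ++ pending ++ [ln]) [] k0 (acc ++ [(cur, pending)]) lines
        (by rw [hl]; simp)
      rw [show (pre₀ ++ pending ++ [ln]).length + ([] : List String).length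
          = pre₀.length + pending.length + 1 from by simp; omega] at h2
      rw [h2]
      simp only [pvChunks_cons, hh]
      simp [List.append_assoc]
    | none =>
      have h2 := ih pre₀ (pending ++ [ln]) cur acc lines (by rw [hl]; simp)
      rw [show pre₀.length + (pending ++ [ln]).length = pre₀.length + pending.length + 1
          from by simp; omega] at h2
      rw [h2]
      simp only [pvChunks_cons, hh]

-- the initial dict literal is pvMkD (fun _ => [])
theorem pvInit_eq :
    pvHints.foldl (fun d k => d.insert k []) PySem.Dict.empty
      = pvMkD (fun _ => []) := by decide

-- final aggregation: filterMap over the map-literal = foldl insert over fresh keys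
theorem pvFinal (G : String → List String) (F : List String → String) :
    ∀ (ks : List String) (d : PySem.Dict String String),
      ks.Nodup → (∀ k ∈ ks, d.contains k = false) →
    (ks.foldl (fun out k =>
        if G k ≠ [] then out.insert k (F (G k)) else out) d).items
      = d.items ++ ks.filterMap (fun k => if G k ≠ [] then some (k, F (G k)) else none) := by
  intro ks
  induction ks with
  | nil => intro d _ _; simp
  | cons k ks ih =>
    intro d hnd hfresh
    simp only [List.foldl_cons, List.filterMap_cons]
    by_cases hG : G k ≠ []
    · rw [if_pos hG, if_pos hG]
      have hfresh' : ∀ k' ∈ ks, (d.insert k (F (G k))).contains k' = false := by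
        intro k' hk'
        rw [PySem.Dict.contains_insert]
        have hne : k' ≠ k := fun e => (List.nodup_cons.mp hnd).1 (e ▸ hk')
        simp [hne, hfresh k' (List.mem_cons_of_mem _ hk')]
      rw [ih _ hnd.of_cons hfresh']
      rw [PySem.Dict.items_insert_of_not_contains _ _ (hfresh k (by simp))]
      simp
    · rw [if_neg hG, if_neg hG,
        ih d hnd.of_cons (fun k' hk' => hfresh k' (List.mem_cons_of_mem _ hk'))]

-- ===== VERDICT (by name: the statement is the Claim_ definition above) =====
theorem detect_sections_spec : Claim_equal_detect_sections := by
  intro text _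
  unfold Spec_detect_sections detect_sections detect_sections_alt
  have hheads := pvHeads_eq ((PySem.Str.splitlines text).map PySem.Str.strip) 0
  simp only [Nat.cast_zero] at hheads
  simp only [pvInit_eq, hheads]
  set lines := (PySem.Str.splitlines text).map PySem.Str.strip with hlines
  have hsum : "summary" ∈ pvHints := by decide
  have hA0 : pvMkD (fun _ => ([] : List String))
      = pvMkD (fun k => if k = "summary" then (fun _ => ([] : List String)) k ++ [] else
          (fun _ => ([] : List String)) k) := by
    refine pvMkD_congr (fun k _ => ?_)
    by_cases h : k = "summary" <;> simp [h]
  rw [hA0, pvLoopA lines "summary" [] (fun _ => []) hsum]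
  have hB := pvLoopB lines [] [] "summary" [] lines (by simp)
  simp only [List.length_nil, Nat.add_zero, Nat.cast_zero, zero_sub, List.nil_append] at hB
  rw [hB]
  rw [pvFinal (pvAgg (pvChunks "summary" [] lines))
    (fun v => PySem.Str.strip (PySem.Str.join "\n" v)) pvHints PySem.Dict.empty
    (by decide) (fun k _ => rfl)]
  simp [pvMkD, List.filterMap_map, PySem.Dict.empty]
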